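-- pv_equiv track=rewrite | github.com/yalingtsui/HackerRank | linethemup.py | decreasing
-- ===== SOURCE A (Python) =====
-- def decreasing(L):
--     if len(L) <=1:
--         return True
--     else:
--         if ord(L[0]) >= ord(L[1]):
--             return decreasing(L[1:])
--         else:
--             return False
-- ===== SOURCE B (Python) =====
-- def decreasing(L):
--     return all(a >= b for a, b in zip(L, L[1:]))
-- ===== Notes on version B (the rewrite author's own statement) =====
-- stated objective: faster
-- what changed: Replaced the O(n^2) slicing recursion with a single linear pass checking all adjacent character pairs via zip.
import Mathlib
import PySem

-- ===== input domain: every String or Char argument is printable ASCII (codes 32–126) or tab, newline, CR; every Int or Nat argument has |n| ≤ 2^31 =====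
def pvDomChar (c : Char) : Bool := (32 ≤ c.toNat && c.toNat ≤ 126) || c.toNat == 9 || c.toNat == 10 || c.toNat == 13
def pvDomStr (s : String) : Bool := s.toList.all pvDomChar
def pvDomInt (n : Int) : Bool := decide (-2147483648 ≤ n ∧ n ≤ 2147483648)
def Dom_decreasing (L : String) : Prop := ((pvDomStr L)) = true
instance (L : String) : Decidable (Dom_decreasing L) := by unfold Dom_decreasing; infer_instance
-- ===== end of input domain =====

-- B replaces A's O(n^2) slicing recursion with one linear pass over adjacent pairs.

-- ===== PORT A =====
-- A recurses on L[1:] after comparing ord(L[0]) with ord(L[1]).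
def decRecA : List Char → Bool
  | [] => true
  | [_] => true
  | a :: b :: rest => if a.toNat ≥ b.toNat then decRecA (b :: rest) else false

def decreasing (L : String) : Bool := decRecA L.toList

-- ===== PORT B =====
-- all(a >= b for a, b in zip(L, L[1:]))
def decreasing_alt (L : String) : Bool :=
  (L.toList.zip (L.toList.drop 1)).all (fun p => decide (p.1.toNat ≥ p.2.toNat))

-- ===== PRECONDITION & SPEC =====
def Spec_decreasing (L : String) (out : Bool) : Prop := out = decreasing_alt L
instance (L : String) (out : Bool) : Decidable (Spec_decreasing L out) := by unfold Spec_decreasing; infer_instance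

-- ===== CLAIM (what is proved, stated in full; the proofs are below) =====
def Claim_equal_decreasing : Prop := ∀ (L : String), Dom_decreasing L → Spec_decreasing L (decreasing L)

-- ===== LEMMAS AND PROOFS =====
theorem decRecA_eq_all (l : List Char) :
    decRecA l = (l.zip (l.drop 1)).all (fun p => decide (p.1.toNat ≥ p.2.toNat)) := by
  match l with
  | [] => rfl
  | [_] => rfl
  | a :: b :: rest =>
    have ih := decRecA_eq_all (b :: rest)
    simp only [decRecA, List.drop, List.zip, List.zipWith, List.all_cons]
    split_ifs with h
    · simp only [ih, decide_eq_true h, Bool.true_and]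
      simp [List.zip, List.drop]
    · simp [h]

-- ===== VERDICT (by name: the statement is the Claim_ definition above) =====
theorem decreasing_spec : Claim_equal_decreasing := by
  intro L _
  unfold Spec_decreasing decreasing decreasing_alt
  exact decRecA_eq_all L.toList
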